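-- pv_equiv track=rewrite | github.com/luludak/FetaFix | modifiers/strategies.py | infer_transpose
-- ===== SOURCE A (Python) =====
-- def infer_transpose(source_dim, target_dim):
--     dims = []
--     td = 0
--     while td < len(target_dim):
--         if source_dim[td] == target_dim[td]:
--             dims.append(td)
--         else:
--             sd = 0
--             while sd < len(source_dim):
--                 # TODO: Refactor
--                 if (target_dim[td] == source_dim[sd] and sd not in dims):
--                     dims.append(sd)
--                     break
--                 sd += 1
--         td += 1
--
--     return dims
-- ===== SOURCE B (Python) =====
-- def infer_transpose(source_dim, target_dim):
--     # Index source positions by value once; each lookup then scans only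
--     # same-valued candidates instead of the whole source list.
--     pos = {}
--     for i, v in enumerate(source_dim):
--         pos.setdefault(v, []).append(i)
--     dims = []
--     used = set()
--     for td in range(len(target_dim)):
--         tv = target_dim[td]
--         if source_dim[td] == tv:
--             dims.append(td)
--             used.add(td)
--         else:
--             for sd in pos.get(tv, []):
--                 if sd not in used:
--                     dims.append(sd)
--                     used.add(sd)
--                     break
--     return dims
-- ===== Notes on version B (the rewrite author's own statement) =====
-- stated objective: faster
-- what changed: B builds a value-to-positions index of source_dim once and keeps a used-set, so each target position scans only same-valued candidates instead of rescanning the whole source list with a linear membership test.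
import Mathlib
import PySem

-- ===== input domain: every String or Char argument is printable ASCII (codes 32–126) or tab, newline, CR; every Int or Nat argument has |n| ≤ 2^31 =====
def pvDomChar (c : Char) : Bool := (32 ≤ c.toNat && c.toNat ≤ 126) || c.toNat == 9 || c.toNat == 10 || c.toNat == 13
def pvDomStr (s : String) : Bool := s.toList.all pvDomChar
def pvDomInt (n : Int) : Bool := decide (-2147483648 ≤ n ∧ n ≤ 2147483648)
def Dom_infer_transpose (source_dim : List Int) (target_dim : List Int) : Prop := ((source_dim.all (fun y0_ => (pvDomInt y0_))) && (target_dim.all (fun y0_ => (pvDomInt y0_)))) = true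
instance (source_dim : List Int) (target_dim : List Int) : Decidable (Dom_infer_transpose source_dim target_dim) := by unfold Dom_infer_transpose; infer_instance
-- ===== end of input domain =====

-- B replaces A's inner scan over the whole source list by a dict indexing source
-- positions by value (built once) plus a used-set, so each lookup scans only
-- same-valued candidates (objective: faster on value-diverse inputs).


-- ===== PORT A =====
-- inner 'while sd < len(source_dim)' with break
def pvAScan (src : List Int) (tv : Int) (dims : List Int) (sd : Nat) : List Int :=
  if _h : sd < src.length then
    if (tv == src.getD sd 0) && !(dims.contains (sd : Int)) then dims ++ [(sd : Int)]
    else pvAScan src tv dims (sd + 1)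
  else dims
termination_by src.length - sd

-- one iteration of the outer 'while td < len(target_dim)'
def pvAStep (src : List Int) (tgt : List Int) (dims : List Int) (td : Nat) : List Int :=
  if src.getD td 0 = tgt.getD td 0 then dims ++ [(td : Int)]
  else pvAScan src (tgt.getD td 0) dims 0

def infer_transpose (source_dim : List Int) (target_dim : List Int) : List Int :=
  (List.range target_dim.length).foldl (pvAStep source_dim target_dim) []

-- ===== PORT B =====
-- pos = {}; for i, v in enumerate(source_dim): pos.setdefault(v, []).append(i)
def pvBPos (src : List Int) : PySem.Dict Int (List Int) :=
  (PySem.List.enumerate src).foldl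
    (fun d p => d.insert p.2 (d.getD p.2 [] ++ [p.1])) PySem.Dict.empty

-- one iteration of 'for td in range(len(target_dim))'; state = (dims, used)
def pvBStep (src : List Int) (pos : PySem.Dict Int (List Int)) (tgt : List Int)
    (st : List Int × PySem.Set Int) (td : Nat) : List Int × PySem.Set Int :=
  let tv := tgt.getD td 0
  if src.getD td 0 = tv then (st.1 ++ [(td : Int)], PySem.Set.add st.2 (td : Int))
  else
    match (pos.getD tv []).find? (fun sd => !(PySem.Set.contains st.2 sd)) with
    | some sd => (st.1 ++ [sd], PySem.Set.add st.2 sd)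
    | none => st

def infer_transpose_alt (source_dim : List Int) (target_dim : List Int) : List Int :=
  ((List.range target_dim.length).foldl
    (pvBStep source_dim (pvBPos source_dim) target_dim) ([], PySem.Set.empty)).1

-- ===== PRECONDITION & SPEC =====
-- A evaluates source_dim[td] for every td < len(target_dim): when target_dim is
-- longer than source_dim it raises IndexError, so those inputs are excluded.
def Pre_infer_transpose (source_dim : List Int) (target_dim : List Int) : Prop :=
  target_dim.length ≤ source_dim.length
instance (source_dim : List Int) (target_dim : List Int) : Decidable (Pre_infer_transpose source_dim target_dim) := by unfold Pre_infer_transpose; infer_instance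

def pvWitness_infer_transpose : List Int × List Int := ([1, 2, 3], [3, 2, 1])

def Spec_infer_transpose (source_dim : List Int) (target_dim : List Int) (out : List Int) : Prop := out = infer_transpose_alt source_dim target_dim
instance (source_dim : List Int) (target_dim : List Int) (out : List Int) : Decidable (Spec_infer_transpose source_dim target_dim out) := by unfold Spec_infer_transpose; infer_instance

-- ===== CLAIM (what is proved, stated in full; the proofs are below) =====
def Claim_equal_infer_transpose : Prop := ∀ (source_dim : List Int) (target_dim : List Int), Dom_infer_transpose source_dim target_dim → Pre_infer_transpose source_dim target_dim → Spec_infer_transpose source_dim target_dim (infer_transpose source_dim target_dim)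

-- ===== LEMMAS AND PROOFS =====

theorem pvFind?_congr {α : Type} {p q : α → Bool} (l : List α) (h : ∀ a, p a = q a) :
    l.find? p = l.find? q := by
  have hpq : p = q := funext h
  rw [hpq]

-- the dict built by pvBPos maps each value v to the ascending list of source
-- positions holding v
theorem pvBPos_fold_getD (l : List (Int × Int)) (d : PySem.Dict Int (List Int)) (v : Int) :
    (l.foldl (fun d p => d.insert p.2 (d.getD p.2 [] ++ [p.1])) d).getD v []
      = d.getD v [] ++ ((l.filter (fun p => v == p.2)).map (·.1)) := by
  induction l generalizing d with
  | nil => simp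
  | cons p l ih =>
    simp only [List.foldl_cons, ih, List.filter_cons]
    rw [PySem.Dict.getD_insert]
    by_cases hv : v = p.2
    · simp [hv]
    · simp [hv]

theorem pvBPos_getD (src : List Int) (v : Int) :
    (pvBPos src).getD v []
      = ((List.range src.length).filter (fun i => v == src.getD i 0)).map (fun i => ((i : Nat) : Int)) := by
  unfold pvBPos
  rw [pvBPos_fold_getD, PySem.List.enumerate_eq_map_pyRange src 0]
  simp only [PySem.List.len_eq, PySem.List.pyRange_one]
  simp [List.filter_map, List.map_map, Function.comp_def]

-- A's inner scan, characterised as a find? over the remaining indices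
theorem pvAScan_eq (src : List Int) (tv : Int) (dims : List Int) (sd : Nat) :
    pvAScan src tv dims sd
      = match (List.range' sd (src.length - sd)).find?
            (fun i => (tv == src.getD i 0) && !(dims.contains ((i : Nat) : Int))) with
        | some i => dims ++ [((i : Nat) : Int)]
        | none => dims := by
  induction hn : src.length - sd generalizing sd with
  | zero =>
    rw [pvAScan]
    have hge : ¬ sd < src.length := by omega
    simp [hge]
  | succ n ih =>
    rw [pvAScan]
    have hlt : sd < src.length := by omega
    rw [List.range'_succ]
    simp only [hlt, dif_pos, List.find?_cons]
    cases hc : ((tv == src.getD sd 0) && !(dims.contains ((sd : Nat) : Int))) with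
    | true => simp
    | false =>
      simp only [Bool.false_eq_true, if_neg, not_false_iff]
      exact ih (sd + 1) (by omega)

-- the loop invariant: the used-set has exactly the members of dims
def pvInv (dims : List Int) (used : PySem.Set Int) : Prop := ∀ x : Int, x ∈ used ↔ x ∈ dims

theorem pvStep_eq (src tgt : List Int) (dims : List Int) (used : PySem.Set Int) (td : Nat)
    (hInv : pvInv dims used) :
    (pvBStep src (pvBPos src) tgt (dims, used) td).1 = pvAStep src tgt dims td ∧
      pvInv (pvBStep src (pvBPos src) tgt (dims, used) td).1
            (pvBStep src (pvBPos src) tgt (dims, used) td).2 := by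
  simp only [pvBStep, pvAStep]
  by_cases heq : src.getD td 0 = tgt.getD td 0
  · simp only [if_pos heq]
    refine ⟨by trivial, fun x => ?_⟩
    simp [PySem.Set.mem_add, hInv x, or_comm]
  · simp only [if_neg heq]
    rw [pvAScan_eq]
    have hrange : List.range' 0 (src.length - 0) = List.range src.length := by
      simp [List.range_eq_range']
    rw [hrange]
    have hfind :
        ((pvBPos src).getD (tgt.getD td 0) []).find? (fun sd => !(PySem.Set.contains used sd))
          = (((List.range src.length).find?
              (fun i => (tgt.getD td 0 == src.getD i 0) && !(dims.contains ((i : Nat) : Int)))).map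
             (fun i => ((i : Nat) : Int))) := by
      rw [pvBPos_getD, List.find?_map, List.find?_filter]
      congr 1
      apply pvFind?_congr
      intro a
      simp only [Function.comp_def]
      have hx := hInv ((a : Nat) : Int)
      by_cases hm : ((a : Nat) : Int) ∈ dims
      · have hu : ((a : Nat) : Int) ∈ used := hx.mpr hm
        simp [hm, hu, Bool.beq_eq_decide_eq]
      · have hu : ((a : Nat) : Int) ∉ used := fun hc => hm (hx.mp hc)
        simp [hm, hu, Bool.beq_eq_decide_eq]
    rw [hfind]
    cases hf : (List.range src.length).find?
        (fun i => (tgt.getD td 0 == src.getD i 0) && !(dims.contains ((i : Nat) : Int))) with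
    | none => exact ⟨rfl, hInv⟩
    | some i =>
      simp only [Option.map_some]
      refine ⟨by trivial, fun x => ?_⟩
      simp [PySem.Set.mem_add, hInv x, or_comm]

theorem pvLoop_eq (src tgt : List Int) (l : List Nat) (dims : List Int) (used : PySem.Set Int)
    (hInv : pvInv dims used) :
    (l.foldl (pvBStep src (pvBPos src) tgt) (dims, used)).1
      = l.foldl (pvAStep src tgt) dims := by
  induction l generalizing dims used with
  | nil => rfl
  | cons td l ih =>
    obtain ⟨h1, h2⟩ := pvStep_eq src tgt dims used td hInv
    simp only [List.foldl_cons]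
    have hsplit : pvBStep src (pvBPos src) tgt (dims, used) td
        = ((pvBStep src (pvBPos src) tgt (dims, used) td).1,
           (pvBStep src (pvBPos src) tgt (dims, used) td).2) := rfl
    rw [hsplit, ih _ _ h2, h1]

-- ===== VERDICT (by name: the statement is the Claim_ definition above) =====
theorem infer_transpose_spec : Claim_equal_infer_transpose := by
  intro src tgt _ _
  unfold Spec_infer_transpose infer_transpose infer_transpose_alt
  rw [pvLoop_eq src tgt _ [] PySem.Set.empty (by intro x; simp [PySem.Set.empty])]
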